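-- pv_equiv track=rewrite | github.com/Zeo077/Kyatz | controllers/default.py | hash_id
-- ===== SOURCE A (Python) =====
-- def hash_id(s):
--     l = len(s)
--     num = 0
--     count = 0
--     for c in s:
--         num += ord(c) * (31 ** (l-1-count))
--         count += 1
--     return hex(num)[2:]
-- ===== SOURCE B (Python) =====
-- def hash_id(s):
--     num = 0
--     for c in s:
--         num = num * 31 + ord(c)
--     return format(num, 'x')
-- ===== Notes on version B (the rewrite author's own statement) =====
-- stated objective: faster
-- what changed: Replaces the per-character power 31**(l-1-i) (recomputed from scratch each iteration) with Horner's rule num = num*31 + ord(c), and renders the prefix-free hex via format instead of slicing hex(num).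
import Mathlib
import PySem

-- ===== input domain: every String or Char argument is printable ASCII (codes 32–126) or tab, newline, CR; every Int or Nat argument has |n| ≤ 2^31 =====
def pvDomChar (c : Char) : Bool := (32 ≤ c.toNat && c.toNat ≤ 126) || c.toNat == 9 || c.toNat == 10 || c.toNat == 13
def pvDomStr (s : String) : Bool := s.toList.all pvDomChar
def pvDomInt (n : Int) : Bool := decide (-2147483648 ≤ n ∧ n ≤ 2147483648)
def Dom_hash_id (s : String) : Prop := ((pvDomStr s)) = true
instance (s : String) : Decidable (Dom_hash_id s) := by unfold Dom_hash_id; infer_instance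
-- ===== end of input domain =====

-- B replaces A's per-character power 31**(l-1-i) with Horner's rule (one multiply-add per
-- character): asymptotically fewer bignum operations, same exact hex string.

-- hex(num)[2:] for the nonnegative num both programs build = lowercase hex digits of num,
-- "0" for 0; Nat.toDigits 16 is exactly that (exact here since num ≥ 0).
def pvHex (n : Nat) : String := String.ofList (Nat.toDigits 16 n)

-- ===== PORT A =====
def hash_id (s : String) : String :=
  let l := s.toList.length
  let st := s.toList.foldl
    (fun (p : Nat × Nat) c => (p.1 + c.toNat * 31 ^ (l - 1 - p.2), p.2 + 1)) (0, 0)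
  pvHex st.1
-- the Python exponent l-1-count is ≥ 0 on every iteration (count < l), so Nat subtraction is exact

-- ===== PORT B =====
def hash_id_alt (s : String) : String :=
  pvHex (s.toList.foldl (fun num c => num * 31 + c.toNat) 0)

-- ===== PRECONDITION & SPEC =====
def Spec_hash_id (s : String) (out : String) : Prop := out = hash_id_alt s
instance (s : String) (out : String) : Decidable (Spec_hash_id s out) := by unfold Spec_hash_id; infer_instance

-- ===== CLAIM (what is proved, stated in full; the proofs are below) =====
def Claim_equal_hash_id : Prop := ∀ (s : String), Dom_hash_id s → Spec_hash_id s (hash_id s)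

-- ===== LEMMAS AND PROOFS =====

-- the polynomial value Σ cᵢ · 31^(remaining length) , recursively
def pvH : List Char → Nat
  | [] => 0
  | c :: cs => c.toNat * 31 ^ cs.length + pvH cs

def pvHsum : List Char → Nat → Nat → Nat
  | [], _, _ => 0
  | c :: cs, l, k => c.toNat * 31 ^ (l - 1 - k) + pvHsum cs l (k + 1)

theorem foldA_eq (cs : List Char) (l : Nat) : ∀ (n k : Nat),
    (List.foldl (fun (p : Nat × Nat) c => (p.1 + c.toNat * 31 ^ (l - 1 - p.2), p.2 + 1)) (n, k) cs).1
      = n + pvHsum cs l k := by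
  induction cs with
  | nil => intro n k; simp [pvHsum]
  | cons c cs ih =>
      intro n k
      simp only [List.foldl_cons, pvHsum, ih]
      ring

theorem hsum_eq (cs : List Char) : ∀ (l k : Nat), l = k + cs.length → pvHsum cs l k = pvH cs := by
  induction cs with
  | nil => intro l k _; rfl
  | cons c cs ih =>
      intro l k hl
      have h1 : l - 1 - k = cs.length := by simp at hl; omega
      rw [pvHsum, pvH, h1, ih l (k + 1) (by simp at hl; omega)]

theorem foldB_eq (cs : List Char) : ∀ (a : Nat),
    List.foldl (fun num c => num * 31 + c.toNat) a cs = a * 31 ^ cs.length + pvH cs := by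
  induction cs with
  | nil => intro a; simp [pvH]
  | cons c cs ih =>
      intro a
      simp only [List.foldl_cons, pvH, ih, List.length_cons]
      ring

-- ===== VERDICT (by name: the statement is the Claim_ definition above) =====
theorem hash_id_spec : Claim_equal_hash_id := by
  intro s _
  show hash_id s = hash_id_alt s
  unfold hash_id hash_id_alt
  simp only [foldA_eq, foldB_eq]
  rw [hsum_eq s.toList s.toList.length 0 (by simp)]
  simp
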